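-- pv_equiv track=rewrite | github.com/sujinjeongg/Baekjoon | 프로그래머스/2/388353. 지게차와 크레인/지게차와 크레인.py | solution
-- ===== SOURCE A (Python) =====
-- from collections import deque
--
-- def solution(storage, requests):
--     N, M = len(storage), len(storage[0])
--     grid = [list(row) for row in storage]
--     total = N * M
--
--     def is_connected(i, j):
--         visited = [[False] * M for _ in range(N)]
--         queue = deque()
--         queue.append((i, j))
--         visited[i][j] = True
--
--         while queue:
--             x, y = queue.popleft()
--             for dx, dy in [(-1,0),(1,0),(0,-1),(0,1)]:
--                 nx, ny = x + dx, y + dy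
--                 if 0 <= nx < N and 0 <= ny < M:
--                     if not visited[nx][ny] and grid[nx][ny] == '-':
--                         visited[nx][ny] = True
--                         queue.append((nx, ny))
--                 else:
--                     return True
--         return False
--
--     for req in requests:
--         target = req[0]
--         to_remove = []
--
--         if len(req) == 2:
--             for i in range(N):
--                 for j in range(M):
--                     if grid[i][j] == target:
--                         to_remove.append((i, j))
--         else:
--             for i in range(N):
--                 for j in range(M):
--                     if grid[i][j] == target and is_connected(i, j):
--                         to_remove.append((i, j))
--
--         for x, y in to_remove:
--             grid[x][y] = '-'
--             total -= 1
--
--     return total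
-- ===== SOURCE B (Python) =====
-- def solution(storage, requests):
--     N, M = len(storage), len(storage[0])
--     grid = [list(row) for row in storage]
--
--     def exterior():
--         # '-' cells connected to the outside border through '-' cells: one multi-source flood fill
--         seeds = [(i, j) for i in range(N) for j in range(M)
--                  if (i == 0 or i == N - 1 or j == 0 or j == M - 1) and grid[i][j] == '-']
--         ext = set(seeds)
--         stack = list(seeds)
--         while stack:
--             x, y = stack.pop()
--             for c in ((x - 1, y), (x + 1, y), (x, y - 1), (x, y + 1)):
--                 if 0 <= c[0] < N and 0 <= c[1] < M and c not in ext and grid[c[0]][c[1]] == '-':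
--                     ext.add(c)
--                     stack.append(c)
--         return ext
--
--     removed = 0
--     for req in requests:
--         target = req[0]
--         if len(req) == 2:
--             to_remove = [(i, j) for i in range(N) for j in range(M) if grid[i][j] == target]
--         else:
--             ext = exterior()
--             to_remove = [(i, j) for i in range(N) for j in range(M)
--                          if grid[i][j] == target
--                          and (i == 0 or i == N - 1 or j == 0 or j == M - 1
--                               or (i - 1, j) in ext or (i + 1, j) in ext
--                               or (i, j - 1) in ext or (i, j + 1) in ext)]
--         for x, y in to_remove:
--             grid[x][y] = '-'
--         removed += len(to_remove)
--     return N * M - removed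
-- ===== Notes on version B (the rewrite author's own statement) =====
-- stated objective: alternative
-- what changed: Per forklift request, A runs a separate BFS (with a fresh N*M visited matrix) from every matching cell to test outside-reachability; B instead runs one multi-source flood fill from the border computing the exterior empty region once per request and then tests each crate for border position or adjacency to that region - asymptotically O(R*N*M) instead of A's O(R*(N*M)^2) worst case, though on sparse random grids A's per-cell searches are tiny and B's flood bookkeeping trades a constant factor for the better worst case.
import Mathlib
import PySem

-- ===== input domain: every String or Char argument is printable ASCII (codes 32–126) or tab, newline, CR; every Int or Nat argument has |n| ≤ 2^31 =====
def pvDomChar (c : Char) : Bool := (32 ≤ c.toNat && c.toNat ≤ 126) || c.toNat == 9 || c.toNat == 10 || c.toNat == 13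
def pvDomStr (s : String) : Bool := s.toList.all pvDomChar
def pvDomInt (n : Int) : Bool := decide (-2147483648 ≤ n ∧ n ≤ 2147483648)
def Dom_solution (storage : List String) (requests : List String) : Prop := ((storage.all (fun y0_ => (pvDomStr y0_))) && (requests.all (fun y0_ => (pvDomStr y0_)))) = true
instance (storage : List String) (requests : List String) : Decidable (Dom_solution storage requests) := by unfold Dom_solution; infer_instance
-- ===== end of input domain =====

-- B replaces A's per-crate BFS (one search from every matching cell per forklift request)
-- by ONE multi-source flood fill of the exterior '-' region per request, then a constant-time
-- border/adjacency test per cell; same return value, A's in-place mutation of a local copy only.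

-- ===== PORT A =====
-- grid[x][y] lookup / grid[x][y] = '-' assignment; used only under 0 ≤ x < N, 0 ≤ y < M guards
def pvGetCell (grid : List (List Char)) (x y : Int) : Char :=
  (grid.getD x.toNat []).getD y.toNat ' '

def pvSetCell (grid : List (List Char)) (x y : Int) : List (List Char) :=
  grid.modify x.toNat (fun row => row.set y.toNat '-')

-- the row-major double loop 'for i in range(N): for j in range(M): if p(i,j): append (i,j)'
-- (both Pythons collect candidate cells with exactly this scan)
def pvScan (N M : Int) (p : Int → Int → Bool) : List (Int × Int) :=
  (PySem.List.pyRange 0 N 1).flatMap (fun i =>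
    ((PySem.List.pyRange 0 M 1).filter (fun j => p i j)).map (fun j => (i, j)))

def pvDirs : List (Int × Int) := [(-1,0),(1,0),(0,-1),(0,1)]

-- the neighbour for-loop of A's BFS: 'none' = the early 'return True' on an out-of-bounds neighbour
def pvNbA (N M : Int) (grid : List (List Char)) (x y : Int) :
    List (Int × Int) → List (Int × Int) → List (Int × Int) →
    Option (List (Int × Int) × List (Int × Int))
  | [], vis, q => some (vis, q)
  | d :: ds, vis, q =>
    let nx := x + d.1
    let ny := y + d.2
    if 0 ≤ nx ∧ nx < N ∧ 0 ≤ ny ∧ ny < M then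
      if (nx, ny) ∉ vis ∧ pvGetCell grid nx ny = '-' then
        pvNbA N M grid x y ds ((nx, ny) :: vis) (q ++ [(nx, ny)])
      else pvNbA N M grid x y ds vis q
    else none

-- A's 'while queue' loop; fuel N*M+1 bounds the iterations (each one pops, pushes only fresh cells)
def pvBfsA (N M : Int) (grid : List (List Char)) :
    Nat → List (Int × Int) → List (Int × Int) → Bool
  | 0, _, _ => false
  | _ + 1, _, [] => false
  | fuel + 1, vis, c :: rest =>
    match pvNbA N M grid c.1 c.2 pvDirs vis rest with
    | none => true
    | some (v', q') => pvBfsA N M grid fuel v' q'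

def pvIsConnected (N M : Int) (grid : List (List Char)) (i j : Int) : Bool :=
  pvBfsA N M grid ((N * M).toNat + 1) [(i, j)] [(i, j)]

def pvStepA (N M : Int) (st : List (List Char) × Int) (req : String) :
    List (List Char) × Int :=
  let target := req.toList.headD ' '
  let toRemove :=
    if req.toList.length = 2 then
      pvScan N M (fun i j => pvGetCell st.1 i j == target)
    else
      pvScan N M (fun i j => pvGetCell st.1 i j == target && pvIsConnected N M st.1 i j)
  toRemove.foldl (fun s c => (pvSetCell s.1 c.1 c.2, s.2 - 1)) st

def solution (storage : List String) (requests : List String) : Int :=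
  let N : Int := storage.length
  let M : Int := (storage.headD "").toList.length
  let grid := storage.map String.toList
  (requests.foldl (pvStepA N M) (grid, N * M)).2

-- ===== PORT B =====
-- B's flood-fill inner loop over the four neighbour cells of a popped cell
def pvNbB (N M : Int) (grid : List (List Char)) :
    List (Int × Int) → List (Int × Int) → List (Int × Int) →
    List (Int × Int) × List (Int × Int)
  | [], ext, st => (ext, st)
  | c :: cs, ext, st =>
    if (0 ≤ c.1 ∧ c.1 < N ∧ 0 ≤ c.2 ∧ c.2 < M) ∧ c ∉ ext ∧ pvGetCell grid c.1 c.2 = '-' then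
      pvNbB N M grid cs (PySem.Set.add ext c) (c :: st)
    else pvNbB N M grid cs ext st

-- B's 'while stack' loop (stack top = list head); fuel N*M+1 bounds the iterations
def pvFloodB (N M : Int) (grid : List (List Char)) :
    Nat → List (Int × Int) → List (Int × Int) → List (Int × Int)
  | 0, ext, _ => ext
  | _ + 1, ext, [] => ext
  | fuel + 1, ext, c :: rest =>
    let es := pvNbB N M grid [(c.1 - 1, c.2), (c.1 + 1, c.2), (c.1, c.2 - 1), (c.1, c.2 + 1)] ext rest
    pvFloodB N M grid fuel es.1 es.2

def pvExterior (N M : Int) (grid : List (List Char)) : List (Int × Int) :=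
  let seeds := pvScan N M (fun i j =>
    (i == 0 || i == N - 1 || j == 0 || j == M - 1) && pvGetCell grid i j == '-')
  pvFloodB N M grid ((N * M).toNat + 1) (PySem.Set.ofList seeds) seeds

def pvAccessible (N M : Int) (ext : List (Int × Int)) (i j : Int) : Bool :=
  i == 0 || i == N - 1 || j == 0 || j == M - 1 ||
  ext.contains (i - 1, j) || ext.contains (i + 1, j) ||
  ext.contains (i, j - 1) || ext.contains (i, j + 1)

def pvStepB (N M : Int) (st : List (List Char) × Int) (req : String) :
    List (List Char) × Int :=
  let target := req.toList.headD ' '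
  let toRemove :=
    if req.toList.length = 2 then
      pvScan N M (fun i j => pvGetCell st.1 i j == target)
    else
      let ext := pvExterior N M st.1
      pvScan N M (fun i j => pvGetCell st.1 i j == target && pvAccessible N M ext i j)
  (toRemove.foldl (fun g c => pvSetCell g c.1 c.2) st.1, st.2 + toRemove.length)

def solution_alt (storage : List String) (requests : List String) : Int :=
  let N : Int := storage.length
  let M : Int := (storage.headD "").toList.length
  let grid := storage.map String.toList
  N * M - (requests.foldl (pvStepB N M) (grid, 0)).2

-- ===== PRECONDITION & SPEC =====
-- Pre_ = exactly the inputs where Python A returns normally: nonempty storage (storage[0] is read),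
-- and — unless requests is empty, in which case nothing else is touched — every request nonempty
-- (req[0] is read) and every row at least as long as row 0 (the scans read grid[i][j] for j < M).
def Pre_solution (storage : List String) (requests : List String) : Prop :=
  storage ≠ [] ∧
  (requests = [] ∨
    ((∀ req ∈ requests, req ≠ "") ∧
     (∀ row ∈ storage, (storage.headD "").toList.length ≤ row.toList.length)))
instance (storage : List String) (requests : List String) : Decidable (Pre_solution storage requests) := by
  unfold Pre_solution; infer_instance

def pvWitness_solution : List String × List String := (["A--", "-B-", "AAB"], ["A", "BB"])

def Spec_solution (storage : List String) (requests : List String) (out : Int) : Prop := out = solution_alt storage requests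
instance (storage : List String) (requests : List String) (out : Int) : Decidable (Spec_solution storage requests out) := by unfold Spec_solution; infer_instance

-- ===== CLAIM (what is proved, stated in full; the proofs are below) =====
def Claim_equal_solution : Prop := ∀ (storage : List String) (requests : List String), Dom_solution storage requests → Pre_solution storage requests → Spec_solution storage requests (solution storage requests)

-- ===== LEMMAS AND PROOFS =====

-- cells, steps and reachability through empty ('-') cells
def pvInb (N M : Int) (c : Int × Int) : Prop :=
  0 ≤ c.1 ∧ c.1 < N ∧ 0 ≤ c.2 ∧ c.2 < M

def pvOpen (grid : List (List Char)) (c : Int × Int) : Prop :=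
  pvGetCell grid c.1 c.2 = '-'

def pvAdj (a b : Int × Int) : Prop :=
  b = (a.1 - 1, a.2) ∨ b = (a.1 + 1, a.2) ∨ b = (a.1, a.2 - 1) ∨ b = (a.1, a.2 + 1)

def pvStep (N M : Int) (grid : List (List Char)) (a b : Int × Int) : Prop :=
  pvAdj a b ∧ pvInb N M b ∧ pvOpen grid b

def pvReach (N M : Int) (grid : List (List Char)) : Int × Int → Int × Int → Prop :=
  Relation.ReflTransGen (pvStep N M grid)

def pvBorder (N M : Int) (c : Int × Int) : Prop :=
  pvInb N M c ∧ (c.1 = 0 ∨ c.1 = N - 1 ∨ c.2 = 0 ∨ c.2 = M - 1)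

def pvCells (N M : Int) : List (Int × Int) := pvScan N M (fun _ _ => true)

lemma mem_pvScan {N M : Int} {p : Int → Int → Bool} {c : Int × Int} :
    c ∈ pvScan N M p ↔ pvInb N M c ∧ p c.1 c.2 = true := by
  unfold pvScan pvInb
  simp only [List.mem_flatMap, List.mem_map, List.mem_filter, PySem.List.mem_pyRange_one]
  constructor
  · rintro ⟨i, hi, j, ⟨hj, hp⟩, rfl⟩
    exact ⟨⟨hi.1, hi.2, hj.1, hj.2⟩, hp⟩
  · rintro ⟨⟨h1, h2, h3, h4⟩, hp⟩
    exact ⟨c.1, ⟨h1, h2⟩, c.2, ⟨⟨h3, h4⟩, hp⟩, rfl⟩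

lemma pvScan_congr {N M : Int} {p q : Int → Int → Bool}
    (h : ∀ i j, 0 ≤ i → i < N → 0 ≤ j → j < M → p i j = q i j) :
    pvScan N M p = pvScan N M q := by
  unfold pvScan
  apply List.flatMap_congr
  intro i hi
  rw [PySem.List.mem_pyRange_one] at hi
  congr 1
  apply List.filter_congr
  intro j hj
  rw [PySem.List.mem_pyRange_one] at hj
  exact h i j hi.1 hi.2 hj.1 hj.2

lemma length_pvCells (N M : Int) : (pvCells N M).length = N.toNat * M.toNat := by
  unfold pvCells pvScan
  simp [List.length_flatMap, PySem.List.length_pyRange_one, List.map_const']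

lemma nodup_length_le_cells {N M : Int} {l : List (Int × Int)}
    (hn : l.Nodup) (hs : ∀ c ∈ l, pvInb N M c) : l.length ≤ (pvCells N M).length := by
  have hsub : l ⊆ pvCells N M := by
    intro c hc
    exact mem_pvScan.2 ⟨hs c hc, rfl⟩
  exact (List.subperm_of_subset hn hsub).length_le

lemma toNat_mul_le (N M : Int) : N.toNat * M.toNat ≤ (N * M).toNat := by
  by_cases hN : N ≤ 0
  · simp [Int.toNat_of_nonpos hN]
  by_cases hM : M ≤ 0
  · simp [Int.toNat_of_nonpos hM]
  have h : ((N.toNat * M.toNat : Nat) : Int) = N * M := by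
    push_cast [Int.toNat_of_nonneg (by omega : (0:Int) ≤ N),
      Int.toNat_of_nonneg (by omega : (0:Int) ≤ M)]
    ring
  have h2 := congrArg Int.toNat h
  simp only [Int.toNat_natCast] at h2
  exact h2.le

lemma pvAdj_symm {a b : Int × Int} (h : pvAdj a b) : pvAdj b a := by
  obtain ⟨a1, a2⟩ := a
  obtain ⟨b1, b2⟩ := b
  simp only [pvAdj, Prod.mk.injEq] at h ⊢
  omega

lemma pvAdj_iff_mem {a b : Int × Int} :
    pvAdj a b ↔ b ∈ [(a.1 - 1, a.2), (a.1 + 1, a.2), (a.1, a.2 - 1), (a.1, a.2 + 1)] := by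
  simp [pvAdj]

lemma pvAdj_iff_dirs {a b : Int × Int} :
    pvAdj a b ↔ ∃ d ∈ pvDirs, b = (a.1 + d.1, a.2 + d.2) := by
  obtain ⟨a1, a2⟩ := a
  obtain ⟨b1, b2⟩ := b
  simp only [pvAdj, pvDirs, List.mem_cons, List.not_mem_nil, or_false, Prod.mk.injEq]
  constructor
  · rintro (⟨h1, h2⟩ | ⟨h1, h2⟩ | ⟨h1, h2⟩ | ⟨h1, h2⟩)
    · exact ⟨(-1, 0), Or.inl rfl, by constructor <;> omega⟩
    · exact ⟨(1, 0), Or.inr (Or.inl rfl), by constructor <;> omega⟩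
    · exact ⟨(0, -1), Or.inr (Or.inr (Or.inl rfl)), by constructor <;> omega⟩
    · exact ⟨(0, 1), Or.inr (Or.inr (Or.inr rfl)), by constructor <;> omega⟩
  · rintro ⟨d, (rfl | rfl | rfl | rfl), h1, h2⟩ <;> simp_all <;> omega

lemma pvReach_open {N M : Int} {grid : List (List Char)} {x y : Int × Int}
    (h : pvReach N M grid x y) (hx : pvInb N M x ∧ pvOpen grid x) :
    pvInb N M y ∧ pvOpen grid y := by
  induction h with
  | refl => exact hx
  | tail _ hstep _ => exact ⟨hstep.2.1, hstep.2.2⟩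

lemma pvReach_rev {N M : Int} {grid : List (List Char)} {x y : Int × Int}
    (h : pvReach N M grid x y) (hx : pvInb N M x ∧ pvOpen grid x) :
    pvReach N M grid y x := by
  induction h with
  | refl => exact Relation.ReflTransGen.refl
  | @tail b c hxb hbc ih =>
    have hb : pvInb N M b ∧ pvOpen grid b := pvReach_open hxb hx
    exact Relation.ReflTransGen.head ⟨pvAdj_symm hbc.1, hb.1, hb.2⟩ ih

-- characterisation of A's neighbour loop when it runs to completion
lemma pvNbA_some {N M : Int} {grid : List (List Char)} {x y : Int} :
    ∀ {ds vis q v' q'}, pvNbA N M grid x y ds vis q = some (v', q') →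
      (∀ d ∈ ds, pvAdj (x, y) (x + d.1, y + d.2)) →
      ∃ new : List (Int × Int),
        v' = new.reverse ++ vis ∧ q' = q ++ new ∧ new.Nodup ∧
        (∀ c ∈ new, c ∉ vis ∧ pvStep N M grid (x, y) c) ∧
        (∀ d ∈ ds, pvInb N M (x + d.1, y + d.2) ∧
          (pvOpen grid (x + d.1, y + d.2) → (x + d.1, y + d.2) ∈ v')) := by
  intro ds
  induction ds with
  | nil =>
    intro vis q v' q' h _
    simp only [pvNbA, Option.some.injEq, Prod.mk.injEq] at h
    exact ⟨[], by simp [h.1.symm], by simp [h.2.symm], List.nodup_nil, by simp, by simp⟩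
  | cons d ds ih =>
    intro vis q v' q' h hds
    simp only [pvNbA] at h
    split at h
    · rename_i hin
      split at h
      · rename_i hcond
        obtain ⟨new1, hv, hq, hnd, hprops, hcomp⟩ := ih h (fun e he => hds e (List.mem_cons_of_mem _ he))
        refine ⟨(x + d.1, y + d.2) :: new1, ?_, ?_, ?_, ?_, ?_⟩
        · rw [hv, List.reverse_cons, List.append_assoc]
          rfl
        · rw [hq, List.append_assoc]
          rfl
        · refine List.Nodup.cons ?_ hnd
          intro hmem
          exact ((hprops _ hmem).1) (List.mem_cons_self)
        · intro c hc
          rcases List.mem_cons.1 hc with rfl | hc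
          · exact ⟨hcond.1, hds d List.mem_cons_self, ⟨hin.1, hin.2.1, hin.2.2.1, hin.2.2.2⟩, hcond.2⟩
          · have := hprops c hc
            exact ⟨fun hv2 => this.1 (List.mem_cons_of_mem _ hv2), this.2⟩
        · intro e he
          rcases List.mem_cons.1 he with rfl | he
          · refine ⟨⟨hin.1, hin.2.1, hin.2.2.1, hin.2.2.2⟩, fun _ => ?_⟩
            rw [hv]
            simp
          · exact hcomp e he
      · rename_i hcond
        obtain ⟨new1, hv, hq, hnd, hprops, hcomp⟩ := ih h (fun e he => hds e (List.mem_cons_of_mem _ he))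
        refine ⟨new1, hv, hq, hnd, hprops, ?_⟩
        intro e he
        rcases List.mem_cons.1 he with rfl | he
        · refine ⟨⟨hin.1, hin.2.1, hin.2.2.1, hin.2.2.2⟩, fun hop => ?_⟩
          have hmem : (x + e.1, y + e.2) ∈ vis := by
            by_contra hnm
            exact hcond ⟨hnm, hop⟩
          rw [hv]
          exact List.mem_append_right _ hmem
        · exact hcomp e he
    · exact absurd h (by simp)

lemma pvNbA_none {N M : Int} {grid : List (List Char)} {x y : Int} :
    ∀ {ds vis q}, pvNbA N M grid x y ds vis q = none →
      ∃ d ∈ ds, ¬ pvInb N M (x + d.1, y + d.2) := by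
  intro ds
  induction ds with
  | nil => intro vis q h; simp [pvNbA] at h
  | cons d ds ih =>
    intro vis q h
    simp only [pvNbA] at h
    split at h
    · split at h
      · obtain ⟨e, he, hne⟩ := ih h
        exact ⟨e, List.mem_cons_of_mem _ he, hne⟩
      · obtain ⟨e, he, hne⟩ := ih h
        exact ⟨e, List.mem_cons_of_mem _ he, hne⟩
    · rename_i hnin
      exact ⟨d, List.mem_cons_self, fun hc => hnin ⟨hc.1, hc.2.1, hc.2.2.1, hc.2.2.2⟩⟩

def pvInvA (N M : Int) (grid : List (List Char)) (vis q : List (Int × Int)) : Prop :=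
  (∀ c ∈ q, c ∈ vis) ∧ (∀ c ∈ vis, pvInb N M c) ∧ vis.Nodup ∧
  (∀ c ∈ vis, c ∉ q → ¬ pvBorder N M c ∧ ∀ d, pvStep N M grid c d → d ∈ vis)

lemma pvEscapeA {N M : Int} {grid : List (List Char)} {vis q : List (Int × Int)}
    (hI : pvInvA N M grid vis q) {c e : Int × Int}
    (hr : pvReach N M grid c e) (hc : c ∈ vis) (he : pvBorder N M e) :
    ∃ s ∈ q, pvReach N M grid s e := by
  revert hc
  induction hr using Relation.ReflTransGen.head_induction_on with
  | refl =>
    intro hc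
    by_cases hq : e ∈ q
    · exact ⟨e, hq, Relation.ReflTransGen.refl⟩
    · exact absurd he (hI.2.2.2 e hc hq).1
  | head h' hpath ih =>
    rename_i a c'
    intro ha
    by_cases hq : a ∈ q
    · exact ⟨a, hq, Relation.ReflTransGen.head h' hpath⟩
    · exact ih ((hI.2.2.2 a ha hq).2 c' h')

lemma pvBfsA_correct {N M : Int} {grid : List (List Char)} :
    ∀ (fuel : Nat) (vis q : List (Int × Int)), pvInvA N M grid vis q →
      (pvCells N M).length - vis.length + q.length < fuel →
      (pvBfsA N M grid fuel vis q = true ↔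
        ∃ s ∈ q, ∃ e, pvReach N M grid s e ∧ pvBorder N M e) := by
  intro fuel
  induction fuel with
  | zero => intro vis q _ hm; omega
  | succ fuel ih =>
    intro vis q hI hm
    match q with
    | [] => simp [pvBfsA]
    | c :: rest =>
      have hdirs : ∀ d ∈ pvDirs, pvAdj (c.1, c.2) (c.1 + d.1, c.2 + d.2) := by
        intro d hd
        simp only [pvDirs, List.mem_cons, List.not_mem_nil, or_false] at hd
        rcases hd with rfl | rfl | rfl | rfl <;>
          simp [pvAdj, Prod.ext_iff] <;> omega
      have hcvis : c ∈ vis := hI.1 c List.mem_cons_self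
      rcases hnb : pvNbA N M grid c.1 c.2 pvDirs vis rest with _ | ⟨v', q'⟩
      · have hbfs : pvBfsA N M grid (fuel + 1) vis (c :: rest) = true := by
          simp only [pvBfsA, hnb]
        rw [hbfs]
        simp only [true_iff]
        obtain ⟨d, hd, hnin⟩ := pvNbA_none hnb
        have hinb : pvInb N M c := hI.2.1 c hcvis
        have hb : pvBorder N M c := by
          refine ⟨hinb, ?_⟩
          simp only [pvDirs, List.mem_cons, List.not_mem_nil, or_false] at hd
          obtain ⟨c1, c2⟩ := c
          obtain ⟨i1, i2, i3, i4⟩ := hinb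
          simp only at i1 i2 i3 i4 ⊢
          rcases hd with rfl | rfl | rfl | rfl <;>
            · simp only [pvInb, not_and, not_lt] at hnin
              omega
        exact ⟨c, List.mem_cons_self, c, Relation.ReflTransGen.refl, hb⟩
      · have hbfs : pvBfsA N M grid (fuel + 1) vis (c :: rest) = pvBfsA N M grid fuel v' q' := by
          simp only [pvBfsA, hnb]
        rw [hbfs]
        obtain ⟨new, hv, hq, hnd, hprops, hcomp⟩ := pvNbA_some hnb hdirs
        have hvis_sub : ∀ z ∈ vis, z ∈ v' := by
          intro z hz; rw [hv]; exact List.mem_append_right _ hz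
        have hnew_sub : ∀ z ∈ new, z ∈ v' := by
          intro z hz; rw [hv]; exact List.mem_append_left _ (List.mem_reverse.2 hz)
        have hq'_mem : ∀ z, z ∈ q' ↔ z ∈ rest ∨ z ∈ new := by
          intro z; rw [hq]; simp
        have hI' : pvInvA N M grid v' q' := by
          refine ⟨?_, ?_, ?_, ?_⟩
          · intro z hz
            rcases (hq'_mem z).1 hz with hz | hz
            · exact hvis_sub z (hI.1 z (List.mem_cons_of_mem _ hz))
            · exact hnew_sub z hz
          · intro z hz
            rw [hv] at hz
            rcases List.mem_append.1 hz with hz | hz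
            · exact ((hprops z (List.mem_reverse.1 hz)).2).2.1
            · exact hI.2.1 z hz
          · rw [hv, List.nodup_append]
            refine ⟨List.nodup_reverse.2 hnd, hI.2.2.1, ?_⟩
            intro z hz w hw heq
            exact (hprops z (List.mem_reverse.1 hz)).1 (heq ▸ hw)
          · intro z hz hnq
            have hznew : z ∉ new := fun hzn => hnq ((hq'_mem z).2 (Or.inr hzn))
            have hzvis : z ∈ vis := by
              rw [hv] at hz
              rcases List.mem_append.1 hz with hz | hz
              · exact absurd (List.mem_reverse.1 hz) hznew
              · exact hz
            by_cases hzc : z = c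
            · subst hzc
              constructor
              · intro hb
                obtain ⟨hinb, hl⟩ := hb
                obtain ⟨z1, z2⟩ := z
                obtain ⟨i1, i2, i3, i4⟩ := hinb
                simp only at i1 i2 i3 i4
                rcases hl with hl | hl | hl | hl <;>
                  [have := (hcomp (-1, 0) (by simp [pvDirs])).1;
                   have := (hcomp (1, 0) (by simp [pvDirs])).1;
                   have := (hcomp (0, -1) (by simp [pvDirs])).1;
                   have := (hcomp (0, 1) (by simp [pvDirs])).1] <;>
                  · obtain ⟨j1, j2, j3, j4⟩ := this
                    simp only at j1 j2 j3 j4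
                    omega
              · intro d hd
                obtain ⟨dd, hdd, rfl⟩ := pvAdj_iff_dirs.1 hd.1
                exact (hcomp dd hdd).2 hd.2.2
            · have hznr : z ∉ rest := fun hzr => hnq ((hq'_mem z).2 (Or.inl hzr))
              have hzq : z ∉ c :: rest := by
                simp only [List.mem_cons, not_or]
                exact ⟨hzc, hznr⟩
              obtain ⟨hb, hcl⟩ := hI.2.2.2 z hzvis hzq
              exact ⟨hb, fun d hd => hvis_sub d (hcl d hd)⟩
        have hlv : v'.length = new.length + vis.length := by
          rw [hv]; simp
        have hlq : q'.length = rest.length + new.length := by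
          rw [hq]; simp
        have hle : v'.length ≤ (pvCells N M).length :=
          nodup_length_le_cells hI'.2.2.1 hI'.2.1
        have hm' : (pvCells N M).length - v'.length + q'.length < fuel := by
          simp only [List.length_cons] at hm
          omega
        rw [ih v' q' hI' hm']
        constructor
        · rintro ⟨s, hs, e, hre, hbe⟩
          rcases (hq'_mem s).1 hs with hsr | hsn
          · exact ⟨s, List.mem_cons_of_mem _ hsr, e, hre, hbe⟩
          · have hstep : pvStep N M grid c s := (hprops s hsn).2
            exact ⟨c, List.mem_cons_self, e, Relation.ReflTransGen.head hstep hre, hbe⟩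
        · rintro ⟨s, hs, e, hre, hbe⟩
          have hsv : s ∈ v' := hvis_sub s (hI.1 s hs)
          obtain ⟨s', hs', hr'⟩ := pvEscapeA hI' hre hsv hbe
          exact ⟨s', hs', e, hr', hbe⟩

lemma pvIsConnected_iff {N M : Int} {grid : List (List Char)} {i j : Int}
    (hinb : pvInb N M (i, j)) :
    (pvIsConnected N M grid i j = true ↔
      ∃ e, pvReach N M grid (i, j) e ∧ pvBorder N M e) := by
  unfold pvIsConnected
  have hI : pvInvA N M grid [(i, j)] [(i, j)] := by
    refine ⟨fun c hc => hc, ?_, List.nodup_singleton _, ?_⟩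
    · intro c hc
      simp only [List.mem_singleton] at hc
      subst hc
      exact hinb
    · intro c hc hnq
      exact absurd hc hnq
  have hb : 0 ≤ i ∧ i < N ∧ 0 ≤ j ∧ j < M := hinb
  have h1 : 1 ≤ (pvCells N M).length := by
    rw [length_pvCells]
    have hN : 1 ≤ N.toNat := by omega
    have hM : 1 ≤ M.toNat := by omega
    exact Nat.one_le_iff_ne_zero.2 (Nat.mul_ne_zero (by omega) (by omega))
  have h2 : (pvCells N M).length ≤ (N * M).toNat := by
    rw [length_pvCells]
    exact toNat_mul_le N M
  have hm : (pvCells N M).length - ([(i, j)] : List (Int × Int)).length +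
      ([(i, j)] : List (Int × Int)).length < (N * M).toNat + 1 := by
    simp only [List.length_singleton]
    omega
  rw [pvBfsA_correct ((N * M).toNat + 1) [(i, j)] [(i, j)] hI hm]
  simp

-- characterisation of B's neighbour loop
lemma pvNbB_spec {N M : Int} {grid : List (List Char)} {p : Int × Int} :
    ∀ {cs ext st ext' st'}, pvNbB N M grid cs ext st = (ext', st') →
      (∀ c ∈ cs, pvAdj p c) →
      ∃ new : List (Int × Int),
        ext' = ext ++ new ∧ st' = new.reverse ++ st ∧ new.Nodup ∧
        (∀ c ∈ new, c ∉ ext ∧ pvStep N M grid p c) ∧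
        (∀ c ∈ cs, pvInb N M c → pvOpen grid c → c ∈ ext') := by
  intro cs
  induction cs with
  | nil =>
    intro ext st ext' st' h _
    simp only [pvNbB, Prod.mk.injEq] at h
    exact ⟨[], by simp [h.1.symm], by simp [h.2.symm], List.nodup_nil, by simp, by simp⟩
  | cons c cs ih =>
    intro ext st ext' st' h hcs
    simp only [pvNbB] at h
    split at h
    · rename_i hcond
      rw [PySem.Set.add_of_not_mem hcond.2.1] at h
      obtain ⟨new1, he, hst, hnd, hprops, hcomp⟩ := ih h (fun e he => hcs e (List.mem_cons_of_mem _ he))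
      refine ⟨c :: new1, ?_, ?_, ?_, ?_, ?_⟩
      · rw [he, List.append_assoc]
        rfl
      · rw [hst, List.reverse_cons, List.append_assoc]
        rfl
      · refine List.Nodup.cons ?_ hnd
        intro hmem
        exact ((hprops _ hmem).1) (List.mem_append_right _ List.mem_cons_self)
      · intro z hz
        rcases List.mem_cons.1 hz with rfl | hz
        · exact ⟨hcond.2.1, hcs z List.mem_cons_self,
            ⟨hcond.1.1, hcond.1.2.1, hcond.1.2.2.1, hcond.1.2.2.2⟩, hcond.2.2⟩
        · have := hprops z hz
          refine ⟨fun hv2 => this.1 (List.mem_append_left _ hv2), this.2⟩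
      · intro z hz hzi hzo
        rcases List.mem_cons.1 hz with rfl | hz
        · rw [he]
          refine List.mem_append_left _ (List.mem_append_right _ List.mem_cons_self)
        · exact hcomp z hz hzi hzo
    · rename_i hcond
      obtain ⟨new1, he, hst, hnd, hprops, hcomp⟩ := ih h (fun e he => hcs e (List.mem_cons_of_mem _ he))
      refine ⟨new1, he, hst, hnd, hprops, ?_⟩
      intro z hz hzi hzo
      rcases List.mem_cons.1 hz with rfl | hz
      · have hzin : z ∈ ext := by
          by_contra hnm
          exact hcond ⟨⟨hzi.1, hzi.2.1, hzi.2.2.1, hzi.2.2.2⟩, hnm, hzo⟩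
        rw [he]
        exact List.mem_append_left _ hzin
      · exact hcomp z hz hzi hzo

def pvInvB (N M : Int) (grid : List (List Char)) (ext st : List (Int × Int)) : Prop :=
  (∀ c ∈ st, c ∈ ext) ∧ (∀ c ∈ ext, pvInb N M c ∧ pvOpen grid c) ∧ ext.Nodup ∧
  (∀ c ∈ ext, c ∉ st → ∀ d, pvStep N M grid c d → d ∈ ext)

lemma pvEscapeB {N M : Int} {grid : List (List Char)} {ext st : List (Int × Int)}
    (hI : pvInvB N M grid ext st) {c e : Int × Int}
    (hr : pvReach N M grid c e) (hc : c ∈ ext) :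
    e ∈ ext ∨ ∃ s ∈ st, pvReach N M grid s e := by
  revert hc
  induction hr using Relation.ReflTransGen.head_induction_on with
  | refl =>
    intro hc
    exact Or.inl hc
  | head h' hpath ih =>
    rename_i a c'
    intro ha
    by_cases hst : a ∈ st
    · exact Or.inr ⟨a, hst, Relation.ReflTransGen.head h' hpath⟩
    · exact ih (hI.2.2.2 a ha hst c' h')

lemma pvFloodB_correct {N M : Int} {grid : List (List Char)} :
    ∀ (fuel : Nat) (ext st : List (Int × Int)), pvInvB N M grid ext st →
      (pvCells N M).length - ext.length + st.length < fuel →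
      ∀ c, (c ∈ pvFloodB N M grid fuel ext st ↔
        c ∈ ext ∨ ∃ s ∈ st, pvReach N M grid s c) := by
  intro fuel
  induction fuel with
  | zero => intro ext st _ hm; omega
  | succ fuel ih =>
    intro ext st hI hm c
    match st with
    | [] =>
      simp only [pvFloodB]
      simp
    | p :: rest =>
      have hcells : ∀ z ∈ [(p.1 - 1, p.2), (p.1 + 1, p.2), (p.1, p.2 - 1), (p.1, p.2 + 1)],
          pvAdj p z := by
        intro z hz
        rw [pvAdj_iff_mem]
        simpa using hz
      rcases hnb : pvNbB N M grid [(p.1 - 1, p.2), (p.1 + 1, p.2), (p.1, p.2 - 1), (p.1, p.2 + 1)]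
          ext rest with ⟨ext', st'⟩
      have hfl : pvFloodB N M grid (fuel + 1) ext (p :: rest) = pvFloodB N M grid fuel ext' st' := by
        simp only [pvFloodB, hnb]
      rw [hfl]
      obtain ⟨new, he, hst, hnd, hprops, hcomp⟩ := pvNbB_spec hnb hcells
      have hext_sub : ∀ z ∈ ext, z ∈ ext' := by
        intro z hz; rw [he]; exact List.mem_append_left _ hz
      have hnew_sub : ∀ z ∈ new, z ∈ ext' := by
        intro z hz; rw [he]; exact List.mem_append_right _ hz
      have hst'_mem : ∀ z, z ∈ st' ↔ z ∈ rest ∨ z ∈ new := by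
        intro z; rw [hst]; simp; tauto
      have hpe : p ∈ ext := hI.1 p List.mem_cons_self
      have hI' : pvInvB N M grid ext' st' := by
        refine ⟨?_, ?_, ?_, ?_⟩
        · intro z hz
          rcases (hst'_mem z).1 hz with hz | hz
          · exact hext_sub z (hI.1 z (List.mem_cons_of_mem _ hz))
          · exact hnew_sub z hz
        · intro z hz
          rw [he] at hz
          rcases List.mem_append.1 hz with hz | hz
          · exact hI.2.1 z hz
          · exact ⟨((hprops z hz).2).2.1, ((hprops z hz).2).2.2⟩
        · rw [he, List.nodup_append]
          refine ⟨hI.2.2.1, hnd, ?_⟩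
          intro z hz w hw heq
          exact (hprops w hw).1 (heq ▸ hz)
        · intro z hz hnq d hd
          have hznew : z ∉ new := fun hzn => hnq ((hst'_mem z).2 (Or.inr hzn))
          have hzext : z ∈ ext := by
            rw [he] at hz
            rcases List.mem_append.1 hz with hz | hz
            · exact hz
            · exact absurd hz hznew
          by_cases hzp : z = p
          · subst hzp
            have hdmem : d ∈ [(z.1 - 1, z.2), (z.1 + 1, z.2), (z.1, z.2 - 1), (z.1, z.2 + 1)] :=
              pvAdj_iff_mem.1 hd.1
            exact hcomp d hdmem hd.2.1 hd.2.2
          · have hznr : z ∉ rest := fun hzr => hnq ((hst'_mem z).2 (Or.inl hzr))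
            have hzq : z ∉ p :: rest := by
              simp only [List.mem_cons, not_or]
              exact ⟨hzp, hznr⟩
            exact hext_sub d (hI.2.2.2 z hzext hzq d hd)
      have hlv : ext'.length = ext.length + new.length := by
        rw [he]; simp
      have hlq : st'.length = rest.length + new.length := by
        rw [hst]
        simp [Nat.add_comm]
      have hle : ext'.length ≤ (pvCells N M).length :=
        nodup_length_le_cells hI'.2.2.1 (fun z hz => (hI'.2.1 z hz).1)
      have hm' : (pvCells N M).length - ext'.length + st'.length < fuel := by
        simp only [List.length_cons] at hm
        omega
      rw [ih ext' st' hI' hm' c]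
      constructor
      · rintro (hc | ⟨s, hs, hr⟩)
        · rw [he] at hc
          rcases List.mem_append.1 hc with hc | hc
          · exact Or.inl hc
          · exact Or.inr ⟨p, List.mem_cons_self, Relation.ReflTransGen.head ((hprops c hc).2) Relation.ReflTransGen.refl⟩
        · rcases (hst'_mem s).1 hs with hsr | hsn
          · exact Or.inr ⟨s, List.mem_cons_of_mem _ hsr, hr⟩
          · exact Or.inr ⟨p, List.mem_cons_self, Relation.ReflTransGen.head ((hprops s hsn).2) hr⟩
      · rintro (hc | ⟨s, hs, hr⟩)
        · exact Or.inl (hext_sub c hc)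
        · rcases List.mem_cons.1 hs with rfl | hsr
          · exact pvEscapeB hI' hr (hext_sub s hpe)
          · exact Or.inr ⟨s, (hst'_mem s).2 (Or.inl hsr), hr⟩

lemma nodup_pvScan {N M : Int} {p : Int → Int → Bool} : (pvScan N M p).Nodup := by
  unfold pvScan
  rw [List.nodup_flatMap]
  constructor
  · intro i _
    exact (List.Nodup.filter _ (PySem.List.nodup_pyRange_one _ _)).map (by
      intro a b hab
      simpa using hab)
  · have : (PySem.List.pyRange 0 N 1).Nodup := PySem.List.nodup_pyRange_one _ _
    refine this.pairwise_of_forall_ne ?_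
    intro a ha b hb hne z hza hzb
    simp only [List.mem_map, List.mem_filter] at hza hzb
    obtain ⟨j1, _, h1⟩ := hza
    obtain ⟨j2, _, h2⟩ := hzb
    apply hne
    rw [← h1] at h2
    exact (Prod.mk.injEq _ _ _ _ ▸ h2).1.symm

lemma mem_pvExterior {N M : Int} {grid : List (List Char)} {c : Int × Int} :
    c ∈ pvExterior N M grid ↔
      ∃ s, pvBorder N M s ∧ pvOpen grid s ∧ pvReach N M grid s c := by
  have hseed : ∀ z : Int × Int, z ∈ pvScan N M (fun i j =>
      (i == 0 || i == N - 1 || j == 0 || j == M - 1) && pvGetCell grid i j == '-') ↔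
      pvBorder N M z ∧ pvOpen grid z := by
    intro z
    rw [mem_pvScan]
    simp only [Bool.and_eq_true, Bool.or_eq_true, beq_iff_eq]
    unfold pvBorder
    tauto
  set seeds := pvScan N M (fun i j =>
      (i == 0 || i == N - 1 || j == 0 || j == M - 1) && pvGetCell grid i j == '-') with hseeds
  have hnods : seeds.Nodup := by
    rw [hseeds]
    exact nodup_pvScan
  have hEx : pvExterior N M grid =
      pvFloodB N M grid ((N * M).toNat + 1) (PySem.Set.ofList seeds) seeds := by
    rw [hseeds]
    rfl
  rw [hEx, PySem.Set.ofList_eq_self_of_nodup seeds hnods]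
  have hI : pvInvB N M grid seeds seeds := by
    refine ⟨fun z hz => hz, ?_, hnods, ?_⟩
    · intro z hz
      have := (hseed z).1 hz
      exact ⟨this.1.1, this.2⟩
    · intro z hz hnz
      exact absurd hz hnz
  have hle : seeds.length ≤ (pvCells N M).length :=
    nodup_length_le_cells hnods (fun z hz => ((hseed z).1 hz).1.1)
  have hcl : (pvCells N M).length ≤ (N * M).toNat := by
    rw [length_pvCells]; exact toNat_mul_le N M
  have hm : (pvCells N M).length - seeds.length + seeds.length < (N * M).toNat + 1 := by
    omega
  rw [pvFloodB_correct ((N * M).toNat + 1) seeds seeds hI hm c]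
  constructor
  · rintro (hc | ⟨s, hs, hr⟩)
    · obtain ⟨hb, ho⟩ := (hseed c).1 hc
      exact ⟨c, hb, ho, Relation.ReflTransGen.refl⟩
    · obtain ⟨hb, ho⟩ := (hseed s).1 hs
      exact ⟨s, hb, ho, hr⟩
  · rintro ⟨s, hb, ho, hr⟩
    right
    exact ⟨s, (hseed s).2 ⟨hb, ho⟩, hr⟩

-- the bridge: A's per-cell BFS test coincides with B's border/exterior-adjacency test
lemma pvIsConnected_eq_accessible {N M : Int} {grid : List (List Char)} {i j : Int}
    (hinb : pvInb N M (i, j)) :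
    pvIsConnected N M grid i j = pvAccessible N M (pvExterior N M grid) i j := by
  rw [Bool.eq_iff_iff, pvIsConnected_iff hinb]
  have hacc : pvAccessible N M (pvExterior N M grid) i j = true ↔
      (i = 0 ∨ i = N - 1 ∨ j = 0 ∨ j = M - 1 ∨
        (i - 1, j) ∈ pvExterior N M grid ∨ (i + 1, j) ∈ pvExterior N M grid ∨
        (i, j - 1) ∈ pvExterior N M grid ∨ (i, j + 1) ∈ pvExterior N M grid) := by
    simp [pvAccessible, or_assoc]
  rw [hacc]
  constructor
  · rintro ⟨e, hre, hbe⟩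
    rcases Relation.ReflTransGen.cases_head hre with heq | ⟨d, hstep, hrd⟩
    · rcases hbe.2 with h | h | h | h <;> rw [← heq] at h <;> simp_all
    · have hd : pvInb N M d ∧ pvOpen grid d := ⟨hstep.2.1, hstep.2.2⟩
      have hde : pvInb N M e ∧ pvOpen grid e := pvReach_open hrd hd
      have hred : pvReach N M grid e d := pvReach_rev hrd hd
      have hdf : d ∈ pvExterior N M grid := mem_pvExterior.2 ⟨e, hbe, hde.2, hred⟩
      rcases hstep.1 with h | h | h | h <;> subst h <;> simp_all
  · intro h
    have hline : (i = 0 ∨ i = N - 1 ∨ j = 0 ∨ j = M - 1) →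
        ∃ e, pvReach N M grid (i, j) e ∧ pvBorder N M e := by
      intro hl
      exact ⟨(i, j), Relation.ReflTransGen.refl, hinb, hl⟩
    have hadj : ∀ d : Int × Int, pvAdj (i, j) d → d ∈ pvExterior N M grid →
        ∃ e, pvReach N M grid (i, j) e ∧ pvBorder N M e := by
      intro d hdadj hdf
      obtain ⟨s, hbs, hos, hrs⟩ := mem_pvExterior.1 hdf
      have hd : pvInb N M d ∧ pvOpen grid d := pvReach_open hrs ⟨hbs.1, hos⟩
      have hrds : pvReach N M grid d s := pvReach_rev hrs ⟨hbs.1, hos⟩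
      exact ⟨s, Relation.ReflTransGen.head ⟨hdadj, hd.1, hd.2⟩ hrds, hbs⟩
    rcases h with h | h | h | h | h | h | h | h
    · exact hline (Or.inl h)
    · exact hline (Or.inr (Or.inl h))
    · exact hline (Or.inr (Or.inr (Or.inl h)))
    · exact hline (Or.inr (Or.inr (Or.inr h)))
    · exact hadj _ (Or.inl rfl) h
    · exact hadj _ (Or.inr (Or.inl rfl)) h
    · exact hadj _ (Or.inr (Or.inr (Or.inl rfl))) h
    · exact hadj _ (Or.inr (Or.inr (Or.inr rfl))) h

lemma pvStep_eq (N M : Int) (g : List (List Char)) (tA rB : Int) (req : String) :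
    pvStepA N M (g, tA) req =
      ((pvStepB N M (g, rB) req).1, tA - ((pvStepB N M (g, rB) req).2 - rB)) := by
  unfold pvStepA pvStepB
  simp only
  have hscan : (if req.toList.length = 2 then
        pvScan N M (fun i j => pvGetCell g i j == req.toList.headD ' ')
      else
        pvScan N M (fun i j => pvGetCell g i j == req.toList.headD ' ' &&
          pvIsConnected N M g i j)) =
      (if req.toList.length = 2 then
        pvScan N M (fun i j => pvGetCell g i j == req.toList.headD ' ')
      else
        pvScan N M (fun i j => pvGetCell g i j == req.toList.headD ' ' &&
          pvAccessible N M (pvExterior N M g) i j)) := by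
    split
    · rfl
    · apply pvScan_congr
      intro i j h1 h2 h3 h4
      rw [pvIsConnected_eq_accessible ⟨h1, h2, h3, h4⟩]
  rw [hscan]
  generalize (if req.toList.length = 2 then
        pvScan N M (fun i j => pvGetCell g i j == req.toList.headD ' ')
      else
        pvScan N M (fun i j => pvGetCell g i j == req.toList.headD ' ' &&
          pvAccessible N M (pvExterior N M g) i j)) = l
  have hfold : ∀ (l : List (Int × Int)) (g : List (List Char)) (t : Int),
      l.foldl (fun s c => (pvSetCell s.1 c.1 c.2, s.2 - 1)) (g, t) =
        (l.foldl (fun g c => pvSetCell g c.1 c.2) g, t - l.length) := by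
    intro l
    induction l with
    | nil => intro g t; simp
    | cons c l ih =>
      intro g t
      simp only [List.foldl_cons, List.length_cons, ih, Prod.mk.injEq]
      refine ⟨trivial, ?_⟩
      push_cast
      ring
  rw [hfold]
  simp only [Prod.mk.injEq]
  refine ⟨trivial, ?_⟩
  ring

lemma pvFold_eq (N M : Int) : ∀ (rs : List String) (g : List (List Char)) (tA rB : Int),
    rs.foldl (pvStepA N M) (g, tA) =
      ((rs.foldl (pvStepB N M) (g, rB)).1, tA - ((rs.foldl (pvStepB N M) (g, rB)).2 - rB)) := by
  intro rs
  induction rs with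
  | nil =>
    intro g tA rB
    simp
  | cons r rs ih =>
    intro g tA rB
    simp only [List.foldl_cons]
    rw [pvStep_eq N M g tA rB r]
    rw [ih (pvStepB N M (g, rB) r).1 (tA - ((pvStepB N M (g, rB) r).2 - rB)) (pvStepB N M (g, rB) r).2]
    have hS : ((pvStepB N M (g, rB) r).1, (pvStepB N M (g, rB) r).2) = pvStepB N M (g, rB) r := rfl
    rw [hS]
    simp only [Prod.mk.injEq]
    refine ⟨trivial, ?_⟩
    ring

-- ===== VERDICT (by name: the statement is the Claim_ definition above) =====
theorem solution_spec : Claim_equal_solution := by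
  intro storage requests _ _
  unfold Spec_solution solution solution_alt
  have h := pvFold_eq (storage.length) ((storage.headD "").toList.length) requests
    (storage.map String.toList) ((storage.length : Int) * ((storage.headD "").toList.length : Int)) 0
  simp only [h]
  omega
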